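-- pv_equiv track=rewrite | github.com/ZoltanMG/fotografia-zoltan-mg | src/kommit.py | diagonal_superior_derecha
-- ===== SOURCE A (Python) =====
-- def diagonal_superior_derecha(dimenciones, x, y):
--     total = 0
--     new_dimencion_x = (dimenciones - x) + 1
--     new_dimencion_y = y
--     new_x = 1
--     new_y = 1
--
--     for fila in range(1, new_dimencion_y):
--         cont = 1
--         for columna in range(1, new_dimencion_x):
--             if cont == fila:
--                 total +=1
--             cont += 1
--     return total
-- ===== SOURCE B (Python) =====
-- def diagonal_superior_derecha(dimenciones, x, y):
--     return max(0, min(y - 1, dimenciones - x))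
-- ===== Notes on version B (the rewrite author's own statement) =====
-- stated objective: faster
-- what changed: Replaces the nested O(n*m) counting loops by the closed form max(0, min(y-1, dimenciones-x)).
import Mathlib
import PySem

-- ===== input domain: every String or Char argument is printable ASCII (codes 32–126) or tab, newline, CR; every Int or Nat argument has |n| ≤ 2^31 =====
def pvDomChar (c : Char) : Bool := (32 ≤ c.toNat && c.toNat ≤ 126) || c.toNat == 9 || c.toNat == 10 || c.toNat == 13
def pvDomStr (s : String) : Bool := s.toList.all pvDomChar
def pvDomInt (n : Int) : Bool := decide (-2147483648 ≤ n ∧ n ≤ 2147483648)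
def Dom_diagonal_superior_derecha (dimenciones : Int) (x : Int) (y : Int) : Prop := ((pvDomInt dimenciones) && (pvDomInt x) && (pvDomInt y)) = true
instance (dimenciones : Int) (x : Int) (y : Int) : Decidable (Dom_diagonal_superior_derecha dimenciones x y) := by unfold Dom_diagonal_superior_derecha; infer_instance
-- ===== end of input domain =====

-- B replaces A's nested counting loops by the closed form max(0, min(y-1, dimenciones-x)); objective: faster (O(1) vs O(n*m)).


-- ===== PORT A =====
def diagonal_superior_derecha (dimenciones : Int) (x : Int) (y : Int) : Int :=
  let total : Int := 0
  let new_dimencion_x : Int := (dimenciones - x) + 1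
  let new_dimencion_y : Int := y
  (PySem.List.pyRange 1 new_dimencion_y 1).foldl
    (fun total fila =>
      ((PySem.List.pyRange 1 new_dimencion_x 1).foldl
        (fun (p : Int × Int) _columna =>
          (if p.2 = fila then p.1 + 1 else p.1, p.2 + 1))
        (total, 1)).1)
    total

-- ===== PORT B =====
def diagonal_superior_derecha_alt (dimenciones : Int) (x : Int) (y : Int) : Int :=
  max 0 (min (y - 1) (dimenciones - x))

-- ===== PRECONDITION & SPEC =====
def Spec_diagonal_superior_derecha (dimenciones : Int) (x : Int) (y : Int) (out : Int) : Prop := out = diagonal_superior_derecha_alt dimenciones x y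
instance (dimenciones : Int) (x : Int) (y : Int) (out : Int) : Decidable (Spec_diagonal_superior_derecha dimenciones x y out) := by unfold Spec_diagonal_superior_derecha; infer_instance

-- ===== CLAIM (what is proved, stated in full; the proofs are below) =====
def Claim_equal_diagonal_superior_derecha : Prop := ∀ (dimenciones : Int) (x : Int) (y : Int), Dom_diagonal_superior_derecha dimenciones x y → Spec_diagonal_superior_derecha dimenciones x y (diagonal_superior_derecha dimenciones x y)

-- ===== LEMMAS AND PROOFS =====

-- the inner loop adds 1 to the total exactly when fila lies in [c, c+n), and advances cont by n
theorem pv_inner (fila : Int) (n : Nat) (t c : Int) :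
    (List.range n).foldl
      (fun (p : Int × Int) _ => (if p.2 = fila then p.1 + 1 else p.1, p.2 + 1)) (t, c)
    = (t + (if c ≤ fila ∧ fila < c + n then 1 else 0), c + n) := by
  induction n generalizing t c with
  | zero => simp [Prod.ext_iff]
  | succ n ih =>
      rw [List.range_succ, List.foldl_append, ih]
      simp only [List.foldl_cons, List.foldl_nil, Prod.ext_iff]
      push_cast
      constructor
      · split_ifs <;> omega
      · ring

-- the outer loop counts the filas in [1, b) that are < 1 + m
theorem pv_outer (m : Nat) (b : Int) :
    (PySem.List.pyRange 1 b 1).foldl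
      (fun (t fila : Int) => t + (if 1 ≤ fila ∧ fila < 1 + (m : Int) then 1 else 0)) 0
    = max 0 (min (b - 1) (m : Int)) := by
  rw [PySem.List.pyRange_one, List.foldl_map]
  have hb : ((b - 1).toNat : Int) = max 0 (b - 1) := by omega
  have key : ∀ (n : Nat) (t : Int),
      (List.range n).foldl
        (fun (t : Int) (k : Nat) => t + (if 1 ≤ 1 + (k : Int) ∧ 1 + (k : Int) < 1 + (m : Int) then 1 else 0)) t
      = t + (min n m : Nat) := by
    intro n
    induction n with
    | zero => simp
    | succ n ih =>
        intro t
        rw [List.range_succ, List.foldl_append, ih]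
        simp only [List.foldl_cons, List.foldl_nil]
        split_ifs with h
        · have : min (n + 1) m = min n m + 1 := by omega
          rw [this]; push_cast; ring
        · have : min (n + 1) m = min n m := by push_cast at h; omega
          rw [this]; ring
  rw [key]
  push_cast
  omega

theorem diagonal_superior_derecha_eq (dimenciones x y : Int) :
    diagonal_superior_derecha dimenciones x y = diagonal_superior_derecha_alt dimenciones x y := by
  unfold diagonal_superior_derecha diagonal_superior_derecha_alt
  simp only
  have hinner : ∀ (total fila : Int),
      ((PySem.List.pyRange 1 ((dimenciones - x) + 1) 1).foldl
        (fun (p : Int × Int) _columna =>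
          (if p.2 = fila then p.1 + 1 else p.1, p.2 + 1)) (total, 1)).1
      = total + (if 1 ≤ fila ∧ fila < 1 + ((dimenciones - x + 1 - 1).toNat : Int) then 1 else 0) := by
    intro total fila
    rw [PySem.List.pyRange_one, List.foldl_map, pv_inner]
  have hfun :
      (fun (total fila : Int) =>
        ((PySem.List.pyRange 1 ((dimenciones - x) + 1) 1).foldl
          (fun (p : Int × Int) _columna =>
            (if p.2 = fila then p.1 + 1 else p.1, p.2 + 1)) (total, 1)).1)
      = fun (t fila : Int) =>
          t + (if 1 ≤ fila ∧ fila < 1 + (((dimenciones - x + 1 - 1).toNat : Nat) : Int) then 1 else 0) := by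
    funext t fila; exact hinner t fila
  rw [hfun, pv_outer]
  omega

-- ===== VERDICT (by name: the statement is the Claim_ definition above) =====
theorem diagonal_superior_derecha_spec : Claim_equal_diagonal_superior_derecha := by
  intro d x y _
  unfold Spec_diagonal_superior_derecha
  exact diagonal_superior_derecha_eq d x y
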